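-- pv_equiv track=rewrite | github.com/MrCode1970/work-hours-automation | parsers/parse_pdf_ylm.py | _select_time_pair
-- ===== SOURCE A (Python) =====
-- IGNORED_TIMES = {"00:00", "00:01"}
--
-- def _select_time_pair(times: list[str]) -> tuple[str, str] | None:
--     clean_times = [t for t in times if t not in IGNORED_TIMES]
--     if len(clean_times) < 2:
--         return None
--     if len(clean_times) == 2:
--         def _to_minutes(value: str) -> int:
--             if ":" not in value:
--                 return -1
--             hours, minutes = value.split(":", 1)
--             return int(hours) * 60 + int(minutes)
--
--         first, second = clean_times[0], clean_times[1]
--         if _to_minutes(first) <= _to_minutes(second):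
--             return first, second
--         return second, first
--
--     parsed = []
--     for t in clean_times:
--         if ":" not in t:
--             continue
--         hours, minutes = t.split(":", 1)
--         parsed.append((t, int(hours) * 60 + int(minutes)))
--
--     parsed.sort(key=lambda item: item[1])
--
--     candidates: list[tuple[int, str, str]] = []
--     for i in range(len(parsed)):
--         for j in range(i + 1, len(parsed)):
--             t_in, m_in = parsed[i]
--             t_out, m_out = parsed[j]
--             if m_out <= m_in:
--                 continue
--             duration = m_out - m_in
--             if 3 * 60 <= duration <= 16 * 60:
--                 score = abs(duration - 8 * 60)
--                 candidates.append((score, t_in, t_out))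
--     if not candidates:
--         return None
--     candidates.sort(key=lambda item: item[0])
--     _, t_in, t_out = candidates[0]
--     return t_in, t_out
-- ===== SOURCE B (Python) =====
-- IGNORED_TIMES = {"00:00", "00:01"}
--
--
-- def _to_minutes(value):
--     if ":" not in value:
--         return -1
--     hours, minutes = value.split(":", 1)
--     return int(hours) * 60 + int(minutes)
--
--
-- def _bisect_left(keys, target, lo, hi):
--     # first index in [lo, hi) whose key is >= target (keys sorted nondecreasing)
--     while lo < hi:
--         mid = (lo + hi) // 2
--         if keys[mid] < target:
--             lo = mid + 1
--         else:
--             hi = mid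
--     return lo
--
--
-- def _prefer(new, old):
--     # keep old unless new is strictly better (smaller score); None = no candidate
--     if new is None:
--         return old
--     if old is None or new[0] < old[0]:
--         return new
--     return old
--
--
-- def _select_time_pair(times):
--     clean = [t for t in times if t not in IGNORED_TIMES]
--     if len(clean) < 2:
--         return None
--     if len(clean) == 2:
--         a, b = clean
--         return (a, b) if _to_minutes(a) <= _to_minutes(b) else (b, a)
--     parsed = sorted(((t, _to_minutes(t)) for t in clean if ":" in t),
--                     key=lambda p: p[1])
--     keys = [m for _, m in parsed]
--     n = len(parsed)
--     best = None  # (score, t_in, t_out), score = |duration - 480|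
--     for i in range(n):
--         t_in, m_in = parsed[i]
--         # the best partner for parsed[i] is one of the two neighbours of
--         # m_in + 480 in the sorted keys (the score is unimodal there)
--         pos = _bisect_left(keys, m_in + 480, i + 1, n)
--         cand = None
--         if pos > i + 1 and keys[pos - 1] >= m_in + 180:
--             # leftmost entry carrying the largest key below the target
--             k = _bisect_left(keys, keys[pos - 1], i + 1, pos)
--             cand = (m_in + 480 - keys[k], t_in, parsed[k][0])
--         if pos < n and keys[pos] <= m_in + 960:
--             cand = _prefer((keys[pos] - m_in - 480, t_in, parsed[pos][0]), cand)
--         best = _prefer(cand, best)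
--     if best is None:
--         return None
--     return best[1], best[2]
-- ===== Notes on version B (the rewrite author's own statement) =====
-- stated objective: alternative
-- what changed: B replaces A's generation and sort of all candidate pairs by, for each start time, a hand-written binary search in the sorted minute keys for the two neighbours of m_in+480 (plus a second binary search for the leftmost duplicate) combined with a running minimum; correct because within the [180,960] window the score |dur-480| is unimodal along the sorted keys, so the per-start optimum is one of the two neighbours of the target.
import Mathlib
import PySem

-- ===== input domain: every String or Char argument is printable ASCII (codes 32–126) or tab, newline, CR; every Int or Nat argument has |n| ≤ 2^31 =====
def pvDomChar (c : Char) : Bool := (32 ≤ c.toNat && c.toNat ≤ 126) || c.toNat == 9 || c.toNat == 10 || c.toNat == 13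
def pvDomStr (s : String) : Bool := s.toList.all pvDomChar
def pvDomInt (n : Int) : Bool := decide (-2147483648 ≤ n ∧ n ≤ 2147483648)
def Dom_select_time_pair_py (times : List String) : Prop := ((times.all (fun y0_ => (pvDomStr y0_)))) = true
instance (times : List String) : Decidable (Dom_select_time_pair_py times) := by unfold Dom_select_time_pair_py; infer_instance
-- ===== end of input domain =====

-- B replaces A's generate-and-sort of all candidate pairs by, for each start index, a binary search
-- in the sorted minute keys for the two neighbours of m_in + 480 (the score |duration - 480| is
-- unimodal along the sorted keys) and a running minimum (an alternative algorithm).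

-- ===== PORT A =====
-- value.split(":", 1) → the two pieces (":" ∈ value guarantees the first branch; PySem.Str.splitMax? is exact)
def pySplit1 (v : String) : String × String :=
  match PySem.Str.splitMax? v ":" 1 with
  | some (h :: m :: _) => (h, m)
  | _ => (v, "")

-- A's _to_minutes; int() failures (ValueError) are excluded by Pre_, so the `.getD 0` is never reached there
def pyToMinutes (value : String) : Int :=
  if PySem.Str.isIn ":" value = false then -1
  else
    ((PySem.Int.ofStr? (pySplit1 value).1).getD 0) * 60 +
      ((PySem.Int.ofStr? (pySplit1 value).2).getD 0)

def select_time_pair_py (times : List String) : Option (List String) :=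
  let clean_times := times.foldl
    (fun acc t => if !(t == "00:00" || t == "00:01") then acc ++ [t] else acc) []
  if clean_times.length < 2 then none
  else if clean_times.length = 2 then
    match clean_times with
    | first :: second :: _ =>
      if pyToMinutes first ≤ pyToMinutes second then some [first, second]
      else some [second, first]
    | _ => none
  else
    let parsed := clean_times.foldl
      (fun acc t =>
        if PySem.Str.isIn ":" t then
          acc ++ [(t, ((PySem.Int.ofStr? (pySplit1 t).1).getD 0) * 60 +
                        ((PySem.Int.ofStr? (pySplit1 t).2).getD 0))]
        else acc)
      ([] : List (String × Int))
    let parsed2 := PySem.List.sorted parsed (fun item => item.2)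
    let candidates : List (Int × String × String) :=
      (PySem.List.pyRange 0 (parsed2.length : Int)).foldl (fun acc i =>
        (PySem.List.pyRange (i + 1) (parsed2.length : Int)).foldl (fun acc j =>
          if (PySem.List.pyGetD parsed2 j ("", 0)).2 ≤ (PySem.List.pyGetD parsed2 i ("", 0)).2 then acc
          else if 180 ≤ (PySem.List.pyGetD parsed2 j ("", 0)).2 - (PySem.List.pyGetD parsed2 i ("", 0)).2 ∧
                   (PySem.List.pyGetD parsed2 j ("", 0)).2 - (PySem.List.pyGetD parsed2 i ("", 0)).2 ≤ 960 then
            acc ++ [(|(PySem.List.pyGetD parsed2 j ("", 0)).2 - (PySem.List.pyGetD parsed2 i ("", 0)).2 - 480|,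
                     (PySem.List.pyGetD parsed2 i ("", 0)).1, (PySem.List.pyGetD parsed2 j ("", 0)).1)]
          else acc) acc) []
    if candidates = [] then none
    else
      match PySem.List.sorted candidates (fun item => item.1) with
      | item :: _ => some [item.2.1, item.2.2]
      | [] => none

-- ===== PORT B =====
-- B's hand-written _bisect_left: the while-loop as recursion on hi - lo; the index mid is always in
-- range at the call sites ((lo+hi)//2 on Nat equals Python's // here since both are nonnegative).
def bLoop (keys : List Int) (target : Int) (lo hi : Nat) : Nat :=
  if _h : lo < hi then
    if PySem.List.pyGetD keys (((lo + hi) / 2 : Nat) : Int) 0 < target then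
      bLoop keys target ((lo + hi) / 2 + 1) hi
    else
      bLoop keys target lo ((lo + hi) / 2)
  else lo
termination_by hi - lo
decreasing_by all_goals omega

-- B's _prefer
def prefer (new old : Option (Int × String × String)) : Option (Int × String × String) :=
  match new with
  | none => old
  | some c =>
    match old with
    | none => some c
    | some b => if c.1 < b.1 then some c else some b

-- the body of B's `for i in range(n)` loop
def bestStep (parsed : List (String × Int)) (keys : List Int) (n : Nat)
    (best : Option (Int × String × String)) (i : Int) : Option (Int × String × String) :=
  let tm := PySem.List.pyGetD parsed i ("", 0)
  let pos := bLoop keys (tm.2 + 480) (i.toNat + 1) n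
  let cand : Option (Int × String × String) :=
    if i.toNat + 1 < pos ∧ tm.2 + 180 ≤ PySem.List.pyGetD keys ((pos : Int) - 1) 0 then
      let k := bLoop keys (PySem.List.pyGetD keys ((pos : Int) - 1) 0) (i.toNat + 1) pos
      some (tm.2 + 480 - PySem.List.pyGetD keys (k : Int) 0, tm.1,
            (PySem.List.pyGetD parsed (k : Int) ("", 0)).1)
    else none
  let cand :=
    if pos < n ∧ PySem.List.pyGetD keys (pos : Int) 0 ≤ tm.2 + 960 then
      prefer (some (PySem.List.pyGetD keys (pos : Int) 0 - tm.2 - 480, tm.1,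
                    (PySem.List.pyGetD parsed (pos : Int) ("", 0)).1)) cand
    else cand
  prefer cand best

def select_time_pair_py_alt (times : List String) : Option (List String) :=
  let clean := times.filter (fun t => !(t == "00:00" || t == "00:01"))
  if clean.length < 2 then none
  else if clean.length = 2 then
    match clean with
    | a :: b :: _ =>
      if pyToMinutes a ≤ pyToMinutes b then some [a, b] else some [b, a]
    | _ => none
  else
    let parsed := PySem.List.sorted
      ((clean.filter (fun t => PySem.Str.isIn ":" t)).map (fun t => (t, pyToMinutes t)))
      (fun p => p.2)
    let keys := parsed.map (fun p => p.2)
    let n := parsed.length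
    let best := (PySem.List.pyRange 0 (n : Int)).foldl (bestStep parsed keys n) none
    match best with
    | none => none
    | some b => some [b.2.1, b.2.2]

-- ===== PRECONDITION & SPEC =====
def pvParseOK (t : String) : Bool :=
  !(PySem.Str.isIn ":" t) ||
    (match PySem.Str.splitMax? t ":" 1 with
     | some (h :: m :: _) => (PySem.Int.ofStr? h).isSome && (PySem.Int.ofStr? m).isSome
     | _ => false)

-- Pre_ excludes exactly the inputs where Python A raises ValueError from int(): at least two surviving
-- strings and some surviving string containing ":" whose two pieces do not both parse as int.
def Pre_select_time_pair_py (times : List String) : Prop :=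
  (times.filter (fun t => !(t == "00:00" || t == "00:01"))).length < 2 ∨
    ∀ t ∈ times.filter (fun t => !(t == "00:00" || t == "00:01")), pvParseOK t = true
instance (times : List String) : Decidable (Pre_select_time_pair_py times) := by
  unfold Pre_select_time_pair_py; infer_instance

def pvWitness_select_time_pair_py : List String := ["08:00", "16:30", "12:00"]

def Spec_select_time_pair_py (times : List String) (out : Option (List String)) : Prop := out = select_time_pair_py_alt times
instance (times : List String) (out : Option (List String)) : Decidable (Spec_select_time_pair_py times out) := by unfold Spec_select_time_pair_py; infer_instance

-- ===== CLAIM (what is proved, stated in full; the proofs are below) =====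
def Claim_equal_select_time_pair_py : Prop := ∀ (times : List String), Dom_select_time_pair_py times → Pre_select_time_pair_py times → Spec_select_time_pair_py times (select_time_pair_py times)

-- ===== LEMMAS AND PROOFS =====

-- the pair candidates of a (sorted) parse, in A's generation order
def candSpec : List (String × Int) → List (Int × String × String)
  | [] => []
  | x :: xs =>
      (xs.filter (fun q => decide (180 ≤ q.2 - x.2) && decide (q.2 - x.2 ≤ 960))).map
        (fun q => (|q.2 - x.2 - 480|, x.1, q.1)) ++ candSpec xs

lemma pyRange_nil {a b : Int} (h : b ≤ a) : PySem.List.pyRange a b = [] := by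
  refine List.eq_nil_iff_forall_not_mem.mpr (fun x hx => ?_)
  rw [PySem.List.mem_pyRange_one] at hx
  omega

lemma foldl_idx_eq_foldl_drop {α : Type} (l : List (String × Int)) (h : α → (String × Int) → α) :
    ∀ (m : Nat) (acc : α),
      (PySem.List.pyRange (m : Int) (l.length : Int)).foldl
        (fun acc j => h acc (PySem.List.pyGetD l j ("", 0))) acc
      = (l.drop m).foldl h acc := by
  suffices H : ∀ (n m : Nat) (acc : α), l.length - m = n →
      (PySem.List.pyRange (m : Int) (l.length : Int)).foldl
        (fun acc j => h acc (PySem.List.pyGetD l j ("", 0))) acc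
      = (l.drop m).foldl h acc from fun m acc => H (l.length - m) m acc rfl
  intro n
  induction n with
  | zero =>
    intro m acc hm
    have hle : l.length ≤ m := by omega
    rw [pyRange_nil (by exact_mod_cast hle), List.drop_eq_nil_of_le hle]
    rfl
  | succ n ih =>
    intro m acc hm
    have hlt : m < l.length := by omega
    rw [PySem.List.pyRange_one_cons (by exact_mod_cast hlt)]
    rw [List.drop_eq_getElem_cons hlt]
    simp only [List.foldl_cons]
    have hget : PySem.List.pyGetD l (m : Int) ("", 0) = l[m] := by
      rw [PySem.List.pyGetD_natCast, List.getD_eq_getElem l _ hlt]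
    rw [hget, show ((m : Int) + 1) = ((m + 1 : Nat) : Int) by push_cast; ring]
    exact ih (m + 1) (h acc l[m]) (by omega)

lemma outer_eq_candSpec (l : List (String × Int)) :
    ∀ (n m : Nat) (acc : List (Int × String × String)), l.length - m = n →
      (PySem.List.pyRange (m : Int) (l.length : Int)).foldl (fun acc i =>
        (PySem.List.pyRange (i + 1) (l.length : Int)).foldl (fun acc j =>
          if (PySem.List.pyGetD l j ("", 0)).2 ≤ (PySem.List.pyGetD l i ("", 0)).2 then acc
          else if 180 ≤ (PySem.List.pyGetD l j ("", 0)).2 - (PySem.List.pyGetD l i ("", 0)).2 ∧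
                   (PySem.List.pyGetD l j ("", 0)).2 - (PySem.List.pyGetD l i ("", 0)).2 ≤ 960 then
            acc ++ [(|(PySem.List.pyGetD l j ("", 0)).2 - (PySem.List.pyGetD l i ("", 0)).2 - 480|,
                     (PySem.List.pyGetD l i ("", 0)).1, (PySem.List.pyGetD l j ("", 0)).1)]
          else acc) acc) acc
      = acc ++ candSpec (l.drop m) := by
  intro n
  induction n with
  | zero =>
    intro m acc hm
    have hle : l.length ≤ m := by omega
    rw [pyRange_nil (by exact_mod_cast hle), List.drop_eq_nil_of_le hle]
    simp [candSpec]
  | succ n ih =>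
    intro m acc hm
    have hlt : m < l.length := by omega
    rw [PySem.List.pyRange_one_cons (by exact_mod_cast hlt)]
    simp only [List.foldl_cons]
    have hget : PySem.List.pyGetD l (m : Int) ("", 0) = l[m] := by
      rw [PySem.List.pyGetD_natCast, List.getD_eq_getElem l _ hlt]
    have hinner :
        (PySem.List.pyRange ((m : Int) + 1) (l.length : Int)).foldl (fun acc j =>
          if (PySem.List.pyGetD l j ("", 0)).2 ≤ (PySem.List.pyGetD l (m : Int) ("", 0)).2 then acc
          else if 180 ≤ (PySem.List.pyGetD l j ("", 0)).2 - (PySem.List.pyGetD l (m : Int) ("", 0)).2 ∧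
                   (PySem.List.pyGetD l j ("", 0)).2 - (PySem.List.pyGetD l (m : Int) ("", 0)).2 ≤ 960 then
            acc ++ [(|(PySem.List.pyGetD l j ("", 0)).2 - (PySem.List.pyGetD l (m : Int) ("", 0)).2 - 480|,
                     (PySem.List.pyGetD l (m : Int) ("", 0)).1, (PySem.List.pyGetD l j ("", 0)).1)]
          else acc) acc
        = acc ++ ((l.drop (m + 1)).filter
              (fun q => decide (180 ≤ q.2 - l[m].2) && decide (q.2 - l[m].2 ≤ 960))).map
            (fun q => (|q.2 - l[m].2 - 480|, l[m].1, q.1)) := by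
      rw [show ((m : Int) + 1) = ((m + 1 : Nat) : Int) by push_cast; ring]
      rw [foldl_idx_eq_foldl_drop l
        (fun acc q =>
          if q.2 ≤ (PySem.List.pyGetD l (m : Int) ("", 0)).2 then acc
          else if 180 ≤ q.2 - (PySem.List.pyGetD l (m : Int) ("", 0)).2 ∧
                   q.2 - (PySem.List.pyGetD l (m : Int) ("", 0)).2 ≤ 960 then
            acc ++ [(|q.2 - (PySem.List.pyGetD l (m : Int) ("", 0)).2 - 480|,
                     (PySem.List.pyGetD l (m : Int) ("", 0)).1, q.1)]
          else acc) (m + 1) acc]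
      rw [PySem.List.foldl_congr_mem _ _
        (fun acc q => if (decide (180 ≤ q.2 - l[m].2) && decide (q.2 - l[m].2 ≤ 960)) = true then
            acc ++ [(|q.2 - l[m].2 - 480|, l[m].1, q.1)] else acc) acc
        (by
          intro acc q _
          rw [hget]
          simp only [Bool.and_eq_true, decide_eq_true_eq]
          split_ifs with h1 h2 <;> try rfl
          exact absurd h2.1 (by omega))]
      exact PySem.List.foldl_append_if _ _ _ _
    rw [hinner]
    rw [show ((m : Int) + 1) = ((m + 1 : Nat) : Int) by push_cast; ring]
    rw [ih (m + 1) _ (by omega)]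
    rw [List.drop_eq_getElem_cons hlt, candSpec]
    simp [List.append_assoc]

lemma foldl_insertBy_head? {α : Type} (key : α → Int) :
    ∀ (xs : List α) (acc : List α),
      (xs.foldl (fun acc x => PySem.List.insertBy (fun a b => decide (key a < key b)) x acc) acc).head?
      = xs.foldl (fun b x => match b with
          | none => some x
          | some m => if key x < key m then some x else some m) acc.head? := by
  intro xs
  induction xs with
  | nil => intro acc; rfl
  | cons x t ih =>
    intro acc
    simp only [List.foldl_cons]
    rw [ih]
    congr 1
    cases acc with
    | nil => rfl
    | cons y ys =>
      simp only [PySem.List.insertBy, List.head?_cons]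
      by_cases h : key x < key y
      · simp [h]
      · simp [h]

lemma sorted_head?_eq_min? {α : Type} (xs : List α) (key : α → Int) :
    (PySem.List.sorted xs key).head? = PySem.List.min? xs key := by
  rw [PySem.List.sorted_eq_foldl_insertBy]
  simpa [PySem.List.min?] using foldl_insertBy_head? key xs []

-- ---------- prefer / min? (first-minimum) theory ----------

lemma prefer_none_right (c : Option (Int × String × String)) : prefer c none = c := by
  cases c <;> rfl

lemma prefer_assoc (a b c : Option (Int × String × String)) :
    prefer c (prefer b a) = prefer (prefer c b) a := by
  cases a <;> cases b <;> cases c <;> simp only [prefer] <;> (try split_ifs) <;>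
    simp_all <;> (try split_ifs) <;> intros <;> first | rfl | omega

lemma min?_eq_foldl_prefer (l : List (Int × String × String)) :
    PySem.List.min? l (fun c => c.1) = l.foldl (fun acc x => prefer (some x) acc) none := by
  unfold PySem.List.min?
  congr 1
  funext acc x
  cases acc <;> rfl

lemma foldl_prefer (l : List (Int × String × String)) :
    ∀ a, l.foldl (fun acc x => prefer (some x) acc) a
      = prefer (PySem.List.min? l (fun c => c.1)) a := by
  induction l with
  | nil => intro a; rw [min?_eq_foldl_prefer]; rfl
  | cons x t ih =>
    intro a
    rw [min?_eq_foldl_prefer]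
    simp only [List.foldl_cons]
    rw [ih (prefer (some x) a), show prefer (some x) none = some x from rfl,
        ih (some x)]
    exact prefer_assoc a (some x) (PySem.List.min? t (fun c => c.1))

lemma min?_append (l1 l2 : List (Int × String × String)) :
    PySem.List.min? (l1 ++ l2) (fun c => c.1)
      = prefer (PySem.List.min? l2 (fun c => c.1)) (PySem.List.min? l1 (fun c => c.1)) := by
  rw [min?_eq_foldl_prefer, List.foldl_append, ← min?_eq_foldl_prefer, foldl_prefer]

lemma min?_head (c : Int × String × String) (l : List (Int × String × String))
    (h : ∀ y ∈ l, c.1 ≤ y.1) :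
    PySem.List.min? (c :: l) (fun c => c.1) = some c := by
  rw [min?_eq_foldl_prefer]
  simp only [List.foldl_cons]
  have hc : prefer (some c) none = some c := rfl
  rw [hc, foldl_prefer]
  cases hm : PySem.List.min? l (fun c => c.1) with
  | none => rfl
  | some m =>
    have hmem := PySem.List.min?_mem hm
    have := h m hmem
    simp only [prefer]
    rw [if_neg (by omega)]

lemma min?_first (l1 l2 : List (Int × String × String)) (c : Int × String × String)
    (h1 : ∀ y ∈ l1, c.1 < y.1) (h2 : ∀ y ∈ l2, c.1 ≤ y.1) :
    PySem.List.min? (l1 ++ c :: l2) (fun c => c.1) = some c := by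
  rw [min?_append, min?_head c l2 h2]
  cases hm : PySem.List.min? l1 (fun c => c.1) with
  | none => rfl
  | some m =>
    have hmem := PySem.List.min?_mem hm
    have := h1 m hmem
    simp only [prefer]
    rw [if_pos (by omega)]

-- ---------- bLoop (binary search) specification ----------

lemma bLoop_spec (keys : List Int) (t : Int)
    (hmono : ∀ j1 j2 : Nat, j1 ≤ j2 → j2 < keys.length → keys.getD j1 0 ≤ keys.getD j2 0) :
    ∀ (d lo hi : Nat), hi - lo = d → lo ≤ hi → hi ≤ keys.length →
      lo ≤ bLoop keys t lo hi ∧ bLoop keys t lo hi ≤ hi ∧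
      (∀ j, lo ≤ j → j < bLoop keys t lo hi → keys.getD j 0 < t) ∧
      (∀ j, bLoop keys t lo hi ≤ j → j < hi → t ≤ keys.getD j 0) := by
  intro d
  induction d using Nat.strong_induction_on with
  | _ d ih =>
    intro lo hi hd hlh hhl
    rw [bLoop]
    by_cases h : lo < hi
    · rw [dif_pos h]
      have hmid1 : lo ≤ (lo + hi) / 2 := by omega
      have hmid2 : (lo + hi) / 2 < hi := by omega
      have hcast : PySem.List.pyGetD keys (((lo + hi) / 2 : Nat) : Int) 0
          = keys.getD ((lo + hi) / 2) 0 := PySem.List.pyGetD_natCast _ _ _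
      by_cases hk : PySem.List.pyGetD keys (((lo + hi) / 2 : Nat) : Int) 0 < t
      · rw [if_pos hk]
        rw [hcast] at hk
        obtain ⟨ha, hb, hc', hd'⟩ := ih (hi - ((lo + hi) / 2 + 1)) (by omega)
          ((lo + hi) / 2 + 1) hi rfl (by omega) hhl
        refine ⟨by omega, hb, ?_, hd'⟩
        intro j hj1 hj2
        by_cases hj : (lo + hi) / 2 + 1 ≤ j
        · exact hc' j hj hj2
        · have : keys.getD j 0 ≤ keys.getD ((lo + hi) / 2) 0 :=
            hmono j ((lo + hi) / 2) (by omega) (by omega)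
          omega
      · rw [if_neg hk]
        rw [hcast] at hk
        obtain ⟨ha, hb, hc', hd'⟩ := ih ((lo + hi) / 2 - lo) (by omega)
          lo ((lo + hi) / 2) rfl (by omega) (by omega)
        refine ⟨ha, by omega, hc', ?_⟩
        intro j hj1 hj2
        by_cases hj : j < (lo + hi) / 2
        · exact hd' j hj1 hj
        · have : keys.getD ((lo + hi) / 2) 0 ≤ keys.getD j 0 :=
            hmono ((lo + hi) / 2) j (by omega) (by omega)
          omega
    · rw [dif_neg h]
      exact ⟨le_refl _, by omega, fun j h1 h2 => by omega, fun j h1 h2 => by omega⟩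

-- ---------- index segments of a list ----------

def seg (P : List (String × Int)) (b e : Nat) : List (String × Int) := (P.drop b).take (e - b)

lemma seg_mem (P : List (String × Int)) (b e : Nat) (he : e ≤ P.length)
    (q : String × Int) :
    q ∈ seg P b e ↔ ∃ j, b ≤ j ∧ j < e ∧ ∃ hj : j < P.length, q = P[j] := by
  unfold seg
  constructor
  · intro hq
    obtain ⟨j', hj', hget⟩ := List.mem_iff_getElem.mp hq
    have hlen : j' < e - b := by
      have := hj'
      simp only [List.length_take, List.length_drop] at this
      omega
    have hjP : b + j' < P.length := by
      have := hj'
      simp only [List.length_take, List.length_drop] at this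
      omega
    refine ⟨b + j', by omega, by omega, hjP, ?_⟩
    rw [← hget]
    rw [List.getElem_take, List.getElem_drop]
  · rintro ⟨j, hbj, hje, hjP, rfl⟩
    apply List.mem_iff_getElem.mpr
    refine ⟨j - b, ?_, ?_⟩
    · simp only [List.length_take, List.length_drop]; omega
    · rw [List.getElem_take, List.getElem_drop]
      congr 1
      omega

lemma seg_split (P : List (String × Int)) (b c e : Nat) (h1 : b ≤ c) (h2 : c ≤ e) :
    seg P b e = seg P b c ++ seg P c e := by
  unfold seg
  rw [show e - b = (c - b) + (e - c) by omega, List.take_add]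
  congr 2
  rw [List.drop_drop, show b + (c - b) = c by omega]

lemma seg_cons (P : List (String × Int)) (b e : Nat) (h1 : b < e) (h2 : b < P.length) :
    seg P b e = P[b] :: seg P (b + 1) e := by
  unfold seg
  rw [List.drop_eq_getElem_cons h2, show e - b = (e - (b + 1)) + 1 by omega]
  rfl

lemma seg_all (P : List (String × Int)) (b : Nat) : seg P b P.length = P.drop b := by
  unfold seg
  exact List.take_of_length_le (by simp)

-- ---------- the per-index candidate equals the first minimum of the pair list ----------

def pairsQ (P : List (String × Int)) (m : Nat) : List (Int × String × String) :=
  ((P.drop (m + 1)).filter (fun q => decide (180 ≤ q.2 - (P.getD m ("", 0)).2) &&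
      decide (q.2 - (P.getD m ("", 0)).2 ≤ 960))).map
    (fun q => (|q.2 - (P.getD m ("", 0)).2 - 480|, (P.getD m ("", 0)).1, q.1))

lemma keys_getD (P : List (String × Int)) (j : Nat) (hj : j < P.length) :
    (P.map (fun p => p.2)).getD j 0 = P[j].2 := by
  rw [List.getD_eq_getElem _ _ (by simpa using hj), List.getElem_map]

lemma bestStep_eq (P : List (String × Int))
    (hs : List.Pairwise (fun a b => a.2 ≤ b.2) P)
    (m : Nat) (hm : m < P.length) (best : Option (Int × String × String)) :
    bestStep P (P.map (fun p => p.2)) P.length best (m : Int)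
      = prefer (PySem.List.min? (pairsQ P m) (fun c => c.1)) best := by
  have hmono' : ∀ j1 j2 : Nat, ∀ h1 : j1 < P.length, ∀ h2 : j2 < P.length, j1 ≤ j2 →
      P[j1].2 ≤ P[j2].2 := by
    intro j1 j2 h1 h2 h12
    rcases Nat.lt_or_ge j1 j2 with h | h
    · exact List.pairwise_iff_getElem.mp hs j1 j2 h1 h2 h
    · have : j1 = j2 := by omega
      subst this; exact le_refl _
  have hmono : ∀ j1 j2 : Nat, j1 ≤ j2 → j2 < (P.map (fun p => p.2)).length →
      (P.map (fun p => p.2)).getD j1 0 ≤ (P.map (fun p => p.2)).getD j2 0 := by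
    intro j1 j2 h12 hj2
    simp only [List.length_map] at hj2
    rw [keys_getD P j1 (by omega), keys_getD P j2 hj2]
    exact hmono' j1 j2 (by omega) hj2 h12
  have hgd : P.getD m ("", 0) = P[m] := List.getD_eq_getElem P _ hm
  simp only [bestStep, PySem.List.pyGetD_natCast, Int.toNat_natCast, hgd]
  set keys := P.map (fun p => p.2) with hkeys
  have hkl : keys.length = P.length := by simp [hkeys]
  obtain ⟨hpos1, hpos2, hlowK, hhighK⟩ := bLoop_spec keys (P[m].2 + 480) hmono
    (P.length - (m + 1)) (m + 1) P.length rfl (by omega) (by omega)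
  set pos := bLoop keys (P[m].2 + 480) (m + 1) P.length with hposdef
  rw [show ((pos : Int) - 1) = ((pos - 1 : Nat) : Int) by omega]
  simp only [PySem.List.pyGetD_natCast]
  -- the window predicate and the score map
  set w : (String × Int) → Bool := fun q => decide (180 ≤ q.2 - P[m].2) && decide (q.2 - P[m].2 ≤ 960) with hw
  set sc : (String × Int) → Int × String × String := fun q => (|q.2 - P[m].2 - 480|, P[m].1, q.1) with hsc
  have hkg : ∀ (j : Nat) (hj : j < P.length), keys.getD j 0 = P[j].2 := fun j hj => keys_getD P j hj
  -- split the tail at pos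
  have hsplit : pairsQ P m = ((seg P (m + 1) pos).filter w).map sc ++ ((P.drop pos).filter w).map sc := by
    unfold pairsQ
    simp only [hgd, ← hw, ← hsc]
    rw [show P.drop (m + 1) = seg P (m + 1) P.length from (seg_all P (m + 1)).symm,
        seg_split P (m + 1) pos P.length (by omega) (by omega), seg_all,
        List.filter_append, List.map_append]
  -- the high side: the first key at or above the target, if it fits the window
  have Habove : (if pos < P.length ∧ keys.getD pos 0 ≤ P[m].2 + 960 then
        some (keys.getD pos 0 - P[m].2 - 480, P[m].1, (P.getD pos ("", 0)).1)
      else none)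
      = PySem.List.min? (((P.drop pos).filter w).map sc) (fun c => c.1) := by
    by_cases hcond : pos < P.length ∧ keys.getD pos 0 ≤ P[m].2 + 960
    · rw [if_pos hcond]
      obtain ⟨hposlt, hfit⟩ := hcond
      have hgp : keys.getD pos 0 = P[pos].2 := hkg pos hposlt
      have hp480 : P[m].2 + 480 ≤ P[pos].2 := by
        have := hhighK pos (le_refl _) hposlt
        rw [hgp] at this; exact this
      rw [List.drop_eq_getElem_cons hposlt,
          List.filter_cons_of_pos (by simp only [hw, Bool.and_eq_true, decide_eq_true_eq]; omega),
          List.map_cons]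
      rw [min?_head]
      · rw [hgp, List.getD_eq_getElem P _ hposlt]
        simp only [hsc]
        rw [abs_of_nonneg (show (0:Int) ≤ P[pos].2 - P[m].2 - 480 by omega)]
      · intro y hy
        obtain ⟨q, hqf, rfl⟩ := List.mem_map.mp hy
        obtain ⟨hqmem, hqw⟩ := List.mem_filter.mp hqf
        obtain ⟨j, hj1, hj2, hjP, rfl⟩ := by
          have : q ∈ seg P (pos + 1) P.length := by rwa [seg_all]
          exact (seg_mem P (pos + 1) P.length (le_refl _) q).mp this
        have : P[pos].2 ≤ P[j].2 := hmono' pos j hposlt hjP (by omega)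
        simp only [hsc]
        rw [abs_of_nonneg (by omega), abs_of_nonneg (by omega)]
        omega
    · rw [if_neg hcond]
      have hnil : (P.drop pos).filter w = [] := by
        rw [List.filter_eq_nil_iff]
        intro q hq
        obtain ⟨j, hj1, hj2, hjP, rfl⟩ := by
          have : q ∈ seg P pos P.length := by rwa [seg_all]
          exact (seg_mem P pos P.length (le_refl _) q).mp this
        have h1 : P[m].2 + 480 ≤ P[j].2 := by
          have := hhighK j hj1 hjP
          rwa [hkg j hjP] at this
        have h2 : ¬(pos < P.length ∧ keys.getD pos 0 ≤ P[m].2 + 960) := hcond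
        have hposlt : pos < P.length := by omega
        have h3 : P[m].2 + 960 < keys.getD pos 0 := by
          by_contra hx
          exact h2 ⟨hposlt, by omega⟩
        rw [hkg pos hposlt] at h3
        have : P[pos].2 ≤ P[j].2 := hmono' pos j hposlt hjP hj1
        simp only [hw, Bool.and_eq_true, decide_eq_true_eq]
        omega
      rw [hnil]
      rfl
  -- the low side: the leftmost entry carrying the largest key below the target
  have Hbelow : (if m + 1 < pos ∧ P[m].2 + 180 ≤ keys.getD (pos - 1) 0 then
        some (P[m].2 + 480 - keys.getD (bLoop keys (keys.getD (pos - 1) 0) (m + 1) pos) 0, P[m].1,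
              (P.getD (bLoop keys (keys.getD (pos - 1) 0) (m + 1) pos) ("", 0)).1)
      else none)
      = PySem.List.min? (((seg P (m + 1) pos).filter w).map sc) (fun c => c.1) := by
    by_cases hp : m + 1 < pos
    · have hpos1lt : pos - 1 < P.length := by omega
      have hgv : keys.getD (pos - 1) 0 = P[pos - 1].2 := hkg (pos - 1) hpos1lt
      have hvlt : P[pos - 1].2 < P[m].2 + 480 := by
        have := hlowK (pos - 1) (by omega) (by omega)
        rwa [hgv] at this
      by_cases hv : P[m].2 + 180 ≤ keys.getD (pos - 1) 0
      · rw [if_pos ⟨hp, hv⟩]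
        rw [hgv] at hv
        obtain ⟨hk1, hk2, hklow, hkhigh⟩ := bLoop_spec keys (keys.getD (pos - 1) 0) hmono
          (pos - (m + 1)) (m + 1) pos rfl (by omega) (by omega)
        set k := bLoop keys (keys.getD (pos - 1) 0) (m + 1) pos with hkdef
        have hkpos : k < pos := by
          rcases Nat.lt_or_ge k pos with h | h
          · exact h
          · exfalso
            have := hklow (pos - 1) (by omega) (by omega)
            omega
        have hkP : k < P.length := by omega
        have hkv : P[k].2 = P[pos - 1].2 := by
          have h1 := hkhigh k (le_refl _) hkpos
          rw [hgv, hkg k hkP] at h1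
          have h2 : P[k].2 ≤ P[pos - 1].2 := hmono' k (pos - 1) hkP hpos1lt (by omega)
          omega
        have hdec : seg P (m + 1) pos
            = seg P (m + 1) k ++ P[k] :: seg P (k + 1) pos := by
          rw [seg_split P (m + 1) k pos (by omega) (by omega), seg_cons P k pos hkpos hkP]
        rw [hdec, List.filter_append,
            List.filter_cons_of_pos (by simp only [hw, Bool.and_eq_true, decide_eq_true_eq]; omega),
            List.map_append, List.map_cons]
        rw [min?_first]
        · rw [hkg k hkP, List.getD_eq_getElem P _ hkP]
          simp only [hsc]
          rw [abs_of_nonpos (show P[k].2 - P[m].2 - 480 ≤ 0 by omega),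
              show P[m].2 + 480 - P[k].2 = -(P[k].2 - P[m].2 - 480) by ring]
        · intro y hy
          obtain ⟨q, hqf, rfl⟩ := List.mem_map.mp hy
          obtain ⟨hqmem, hqw⟩ := List.mem_filter.mp hqf
          obtain ⟨j, hj1, hj2, hjP, rfl⟩ := (seg_mem P (m + 1) k (by omega) q).mp hqmem
          have hjv : P[j].2 < P[pos - 1].2 := by
            have := hklow j hj1 hj2
            rwa [hgv, hkg j hjP] at this
          have hjlt : P[j].2 < P[m].2 + 480 := by omega
          simp only [hsc]
          rw [abs_of_nonpos (by omega), abs_of_nonpos (by omega)]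
          omega
        · intro y hy
          obtain ⟨q, hqf, rfl⟩ := List.mem_map.mp hy
          obtain ⟨hqmem, hqw⟩ := List.mem_filter.mp hqf
          obtain ⟨j, hj1, hj2, hjP, rfl⟩ := (seg_mem P (k + 1) pos (by omega) q).mp hqmem
          have hjge : P[pos - 1].2 ≤ P[j].2 := by
            have := hkhigh j (by omega) hj2
            rwa [hgv, hkg j hjP] at this
          have hjle : P[j].2 ≤ P[pos - 1].2 := hmono' j (pos - 1) hjP hpos1lt (by omega)
          simp only [hsc]
          rw [abs_of_nonpos (by omega), abs_of_nonpos (by omega)]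
          omega
      · rw [if_neg (by intro hx; exact hv hx.2)]
        have hnil : (seg P (m + 1) pos).filter w = [] := by
          rw [List.filter_eq_nil_iff]
          intro q hq
          obtain ⟨j, hj1, hj2, hjP, rfl⟩ := (seg_mem P (m + 1) pos (by omega) q).mp hq
          have hle : P[j].2 ≤ P[pos - 1].2 := hmono' j (pos - 1) hjP hpos1lt (by omega)
          rw [hgv] at hv
          simp only [hw, Bool.and_eq_true, decide_eq_true_eq]
          omega
        rw [hnil]
        rfl
    · rw [if_neg (by intro hx; exact hp hx.1)]
      have : seg P (m + 1) pos = [] := by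
        unfold seg
        rw [show pos - (m + 1) = 0 by omega]
        rfl
      rw [this]
      rfl
  rw [hsplit, min?_append, ← Habove, ← Hbelow]
  by_cases hcond : pos < P.length ∧ keys.getD pos 0 ≤ P[m].2 + 960
  · rw [if_pos hcond, if_pos hcond]
  · rw [if_neg hcond, if_neg hcond]
    rfl

-- ---------- the whole loop computes the first minimum of candSpec ----------

lemma foldB (P : List (String × Int)) (hs : List.Pairwise (fun a b => a.2 ≤ b.2) P) :
    ∀ (d m : Nat), P.length - m = d → ∀ acc,
      (PySem.List.pyRange (m : Int) (P.length : Int)).foldl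
          (bestStep P (P.map (fun p => p.2)) P.length) acc
        = prefer (PySem.List.min? (candSpec (P.drop m)) (fun c => c.1)) acc := by
  intro d
  induction d with
  | zero =>
    intro m hd acc
    rw [pyRange_nil (by exact_mod_cast (by omega : P.length ≤ m)),
        List.drop_eq_nil_of_le (by omega)]
    rfl
  | succ n ih =>
    intro m hd acc
    have hlt : m < P.length := by omega
    rw [PySem.List.pyRange_one_cons (by exact_mod_cast hlt)]
    simp only [List.foldl_cons]
    rw [bestStep_eq P hs m hlt acc]
    rw [show ((m : Int) + 1) = ((m + 1 : Nat) : Int) by push_cast; ring]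
    rw [ih (m + 1) (by omega) _]
    rw [prefer_assoc]
    congr 1
    rw [← min?_append]
    congr 1
    rw [List.drop_eq_getElem_cons hlt, candSpec]
    unfold pairsQ
    rw [List.getD_eq_getElem P _ hlt]

-- ===== VERDICT (by name: the statement is the Claim_ definition above) =====
theorem select_time_pair_py_spec : Claim_equal_select_time_pair_py := by
  intro times _ hpre
  unfold Spec_select_time_pair_py select_time_pair_py select_time_pair_py_alt
  rw [PySem.List.foldl_append_if_eq_filter (fun t => !(t == "00:00" || t == "00:01")) times []]
  simp only [List.nil_append]
  set clean := times.filter (fun t => !(t == "00:00" || t == "00:01")) with hclean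
  by_cases h2 : clean.length < 2
  · simp [h2]
  · rw [if_neg h2, if_neg h2]
    by_cases he : clean.length = 2
    · rw [if_pos he, if_pos he]
    · rw [if_neg he, if_neg he]
      rw [PySem.List.foldl_append_if (fun t => PySem.Str.isIn ":" t)
        (fun t => (t, ((PySem.Int.ofStr? (pySplit1 t).1).getD 0) * 60 +
                        ((PySem.Int.ofStr? (pySplit1 t).2).getD 0))) clean []]
      simp only [List.nil_append]
      have hmap : (clean.filter (fun t => PySem.Str.isIn ":" t)).map
            (fun t => (t, ((PySem.Int.ofStr? (pySplit1 t).1).getD 0) * 60 +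
                            ((PySem.Int.ofStr? (pySplit1 t).2).getD 0)))
          = (clean.filter (fun t => PySem.Str.isIn ":" t)).map (fun t => (t, pyToMinutes t)) := by
        refine List.map_congr_left (fun t ht => ?_)
        have hin : PySem.Str.isIn ":" t = true := (List.mem_filter.mp ht).2
        unfold pyToMinutes
        rw [if_neg (by intro h; rw [hin] at h; cases h)]
      rw [hmap]
      set P := PySem.List.sorted
        ((clean.filter (fun t => PySem.Str.isIn ":" t)).map (fun t => (t, pyToMinutes t)))
        (fun p => p.2) with hP
      have hsorted : List.Pairwise (fun a b => a.2 ≤ b.2) P :=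
        PySem.List.sorted_pairwise _ _
      have hA := outer_eq_candSpec P P.length 0 [] (by omega)
      simp only [Nat.cast_zero, List.drop_zero, List.nil_append] at hA
      rw [hA]
      have hB := foldB P hsorted P.length 0 (by omega) none
      simp only [Nat.cast_zero, List.drop_zero] at hB
      rw [hB, prefer_none_right]
      by_cases hc : candSpec P = []
      · rw [if_pos hc, hc]
        rfl
      · rw [if_neg hc]
        have hhd := sorted_head?_eq_min? (candSpec P) (fun item => item.1)
        cases hs : PySem.List.sorted (candSpec P) (fun item => item.1) with
        | nil => exact absurd ((PySem.List.sorted_eq_nil_iff _ _ _).mp hs) hc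
        | cons c t =>
          rw [hs, List.head?_cons] at hhd
          cases hmin : PySem.List.min? (candSpec P) (fun c => c.1) with
          | none =>
            rw [hmin] at hhd
            cases hhd
          | some c' =>
            rw [hmin] at hhd
            cases hhd
            rfl
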